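-- pv_equiv track=rewrite | github.com/r259c280/CS101 | 6.22 (LAB).py | fix_capitilization
-- ===== SOURCE A (Python) =====
-- def fix_capitilization(usrStr):
--     numberOfSentencesCapitalized = 0
--     sentences = usrStr.split('.')
--     # looping through sentence list so we can modify the sentence in the collection
--     for number in range(len(sentences ) ):
--         sentence = sentences[number]
--         # don't process the empty string if sentence ends with .
--         if len( sentence ) > 0:
--             # loops throug string so we can find the first non space
--             for index in range(len(sentence) ):
--                 if not sentence[index].isspace():
--                     # first non space character, fix or not
--                     if not sentence[index].isupper():
--                         sentences[number] = sentence[:index] + sentence[index].upper() + sentence[index + 1:]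
--                         numberOfSentencesCapitalized += 1
--                     #break out of the range loop so we don't capitialize anything else
--                     break
--     capitalizedString = ".".join(sentences)
--     return numberOfSentencesCapitalized, capitalizedString
-- ===== SOURCE B (Python) =====
-- def fix_capitilization(usrStr):
--     # single streaming pass: need_cap is True at start and after each '.'
--     out = []
--     count = 0
--     need_cap = True
--     for ch in usrStr:
--         if ch == '.':
--             out.append(ch)
--             need_cap = True
--         elif need_cap and not ch.isspace():
--             if not ch.isupper():
--                 count += 1
--             out.append(ch.upper())
--             need_cap = False
--         else:
--             out.append(ch)
--     return count, ''.join(out)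
-- ===== Notes on version B (the rewrite author's own statement) =====
-- stated objective: simpler
-- what changed: Replaces A's split-into-sentence-list, per-sentence index scan with slice-and-rebuild, and rejoin by a single streaming pass over the characters with a need_cap flag set at the start and after every period.
import Mathlib
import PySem

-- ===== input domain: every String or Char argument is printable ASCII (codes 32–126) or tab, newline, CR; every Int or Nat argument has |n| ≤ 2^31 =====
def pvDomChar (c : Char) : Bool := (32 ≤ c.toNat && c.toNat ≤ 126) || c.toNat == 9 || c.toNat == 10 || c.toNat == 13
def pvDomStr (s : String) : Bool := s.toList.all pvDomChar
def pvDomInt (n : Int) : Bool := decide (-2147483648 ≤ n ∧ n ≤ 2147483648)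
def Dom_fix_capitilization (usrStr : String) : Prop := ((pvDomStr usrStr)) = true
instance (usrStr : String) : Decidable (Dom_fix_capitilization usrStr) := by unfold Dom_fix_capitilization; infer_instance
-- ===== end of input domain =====

-- B replaces A's split-on-'.'/inner index scan with slice rebuild/rejoin by a single streaming
-- pass with a need_cap state flag; objective: simpler.

-- ===== PORT A =====
-- inner 'for index in range(len(sentence))' loop of A, with its break and slice-rebuild;
-- pyGet? 'none' is unreachable: indices come from range(len(sentence))
def pvInnerA (sentence : List Char) : List Int → (List Char × Int)
  | [] => (sentence, 0)
  | index :: rest =>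
    match PySem.List.pyGet? sentence index with
    | none => (sentence, 0)
    | some c =>
      if !(PySem.Chars.isspace c) then
        if !(PySem.Chars.isupper c) then
          (PySem.List.slice sentence none (some index) ++ [PySem.Chars.upperChar c]
             ++ PySem.List.slice sentence (some (index + 1)) none, 1)
        else (sentence, 0)
      else pvInnerA sentence rest

-- outer 'for number in range(len(sentences))' loop of A, updating the sentence list in place;
-- pyGet? 'none' is unreachable: indices come from range(len(sentences))
def pvOuterA : (List (List Char) × Int) → List Int → (List (List Char) × Int)
  | state, [] => state
  | (sentences, count), number :: rest =>
    match PySem.List.pyGet? sentences number with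
    | none => pvOuterA (sentences, count) rest
    | some sentence =>
      if sentence.length > 0 then
        let r := pvInnerA sentence (PySem.List.pyRange 0 sentence.length 1)
        pvOuterA (sentences.set number.toNat r.1, count + r.2) rest
      else pvOuterA (sentences, count) rest

def fix_capitilization (usrStr : String) : Int × String :=
  let sentences := PySem.Chars.splitOn usrStr.toList ['.']
  let res := pvOuterA (sentences, 0) (PySem.List.pyRange 0 (sentences.length : Int) 1)
  (res.2, String.ofList (PySem.Chars.join ['.'] res.1))

-- ===== PORT B =====
-- B's single streaming loop: state (out, count, need_cap)
def pvAltGo : List Char → List Char → Int → Bool → Int × List Char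
  | [], out, count, _ => (count, out)
  | ch :: rest, out, count, need_cap =>
    if ch = '.' then pvAltGo rest (out ++ [ch]) count true
    else if need_cap && !(PySem.Chars.isspace ch) then
      pvAltGo rest (out ++ [PySem.Chars.upperChar ch])
        (if !(PySem.Chars.isupper ch) then count + 1 else count) false
    else pvAltGo rest (out ++ [ch]) count need_cap

def fix_capitilization_alt (usrStr : String) : Int × String :=
  let res := pvAltGo usrStr.toList [] 0 true
  (res.1, String.ofList res.2)

-- ===== PRECONDITION & SPEC =====
def Spec_fix_capitilization (usrStr : String) (out : Int × String) : Prop := out = fix_capitilization_alt usrStr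
instance (usrStr : String) (out : Int × String) : Decidable (Spec_fix_capitilization usrStr out) := by unfold Spec_fix_capitilization; infer_instance

-- ===== CLAIM (what is proved, stated in full; the proofs are below) =====
def Claim_equal_fix_capitilization : Prop := ∀ (usrStr : String), Dom_fix_capitilization usrStr → Spec_fix_capitilization usrStr (fix_capitilization usrStr)

-- ===== LEMMAS AND PROOFS =====

-- capitalizing the first non-space character of one '.'-free segment: the clean recursion both loops are reduced to
def pvFix : List Char → List Char × Int
  | [] => ([], 0)
  | c :: cs =>
    if PySem.Chars.isspace c then
      let r := pvFix cs; (c :: r.1, r.2)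
    else if PySem.Chars.isupper c then (c :: cs, 0)
    else (PySem.Chars.upperChar c :: cs, 1)

-- clean recursion computing s.split('.')
def pvSplit : List Char → List (List Char)
  | [] => [[]]
  | c :: rest =>
    if c = '.' then [] :: pvSplit rest
    else match pvSplit rest with
      | [] => [[c]]
      | s :: ss => (c :: s) :: ss

theorem pvSplit_ne_nil (cs : List Char) : pvSplit cs ≠ [] := by
  cases cs with
  | nil => simp [pvSplit]
  | cons c rest =>
    simp only [pvSplit]
    split
    · simp
    · split <;> simp

theorem join_pvSplit (cs : List Char) : PySem.Chars.join ['.'] (pvSplit cs) = cs := by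
  induction cs with
  | nil => simp [pvSplit, PySem.Chars.join_singleton]
  | cons c rest ih =>
    simp only [pvSplit]
    by_cases h : c = '.'
    · subst h
      rw [if_pos rfl]
      cases hs : pvSplit rest with
      | nil => exact absurd hs (pvSplit_ne_nil rest)
      | cons s ss =>
        rw [PySem.Chars.join_cons_cons]
        rw [hs] at ih
        simp [ih]
    · rw [if_neg h]
      cases hs : pvSplit rest with
      | nil => exact absurd hs (pvSplit_ne_nil rest)
      | cons s ss =>
        rw [hs] at ih
        cases ss with
        | nil => rw [PySem.Chars.join_singleton] at ih ⊢; simp [ih]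
        | cons s2 ss2 =>
          rw [PySem.Chars.join_cons_cons] at ih ⊢
          simp [ih]

theorem not_dot_mem_pvSplit (cs : List Char) : ∀ s ∈ pvSplit cs, '.' ∉ s := by
  induction cs with
  | nil => simp [pvSplit]
  | cons c rest ih =>
    simp only [pvSplit]
    by_cases h : c = '.'
    · subst h
      rw [if_pos rfl]
      intro s hs
      rcases List.mem_cons.1 hs with h1 | h1
      · subst h1; simp
      · exact ih s h1
    · rw [if_neg h]
      cases hsp : pvSplit rest with
      | nil => exact absurd hsp (pvSplit_ne_nil rest)
      | cons s ss =>
        intro t ht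
        rcases List.mem_cons.1 ht with h1 | h1
        · subst h1
          intro hm
          rcases List.mem_cons.1 hm with h2 | h2
          · exact h h2.symm
          · exact ih s (hsp ▸ List.mem_cons_self ..) h2
        · exact ih t (hsp ▸ List.mem_cons_of_mem _ h1)

theorem splitOn_go_eq : ∀ (fuel : Nat) (l : List Char), l.length ≤ fuel → ∀ (cur : List Char) (acc : List (List Char)),
    PySem.Chars.splitOn.go ['.'] fuel l cur acc =
      acc.reverse ++ (match pvSplit l with
        | [] => [cur.reverse]
        | s :: ss => (cur.reverse ++ s) :: ss) := by
  intro fuel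
  induction fuel with
  | zero =>
    intro l hl cur acc
    have : l = [] := List.eq_nil_of_length_eq_zero (Nat.le_zero.1 hl)
    subst this
    simp [PySem.Chars.splitOn.go, pvSplit]
  | succ f ih =>
    intro l hl cur acc
    cases l with
    | nil => simp [PySem.Chars.splitOn.go, pvSplit]
    | cons c rest =>
      rw [PySem.Chars.splitOn.go]
      by_cases h : c = '.'
      · subst h
        rw [if_pos (by simp [List.isPrefixOf])]
        simp only [List.length_cons] at hl
        have hdrop : List.drop (['.'] : List Char).length ('.' :: rest) = rest := rfl
        rw [hdrop, ih rest (by omega) [] (cur.reverse :: acc)]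
        cases hs : pvSplit rest with
        | nil => exact absurd hs (pvSplit_ne_nil rest)
        | cons s ss => simp [pvSplit, hs]
      · rw [if_neg (by simp [List.isPrefixOf]; exact Ne.symm h)]
        simp only [List.length_cons] at hl
        rw [ih rest (by omega) (c :: cur) acc]
        cases hs : pvSplit rest with
        | nil => exact absurd hs (pvSplit_ne_nil rest)
        | cons s ss => simp [pvSplit, hs, h]

theorem splitOn_eq (cs : List Char) : PySem.Chars.splitOn cs ['.'] = pvSplit cs := by
  rw [PySem.Chars.splitOn, splitOn_go_eq (cs.length + 1) cs (by omega) [] []]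
  cases hs : pvSplit cs with
  | nil => exact absurd hs (pvSplit_ne_nil cs)
  | cons s ss => simp

theorem upperChar_of_isupper (c : Char) (h : PySem.Chars.isupper c = true) :
    PySem.Chars.upperChar c = c := by
  simp only [PySem.Chars.isupper, Bool.and_eq_true, decide_eq_true_eq] at h
  rw [PySem.Chars.upperChar, if_neg]
  simp only [PySem.Chars.islower, Bool.and_eq_true, decide_eq_true_eq, not_and]
  intro h1
  exact absurd (le_trans h1 h.2) (by decide)

theorem altGo_copy (xs : List Char) : ∀ (ys out : List Char) (count : Int), '.' ∉ xs →
    pvAltGo (xs ++ ys) out count false = pvAltGo ys (out ++ xs) count false := by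
  induction xs with
  | nil => simp
  | cons c cs ih =>
    intro ys out count h
    simp only [List.mem_cons, not_or] at h
    simp only [List.cons_append, pvAltGo, if_neg (Ne.symm h.1), Bool.false_and,
      Bool.false_eq_true, if_false]
    rw [ih ys (out ++ [c]) count h.2, List.append_assoc]
    rfl

theorem altGo_seg (xs : List Char) (hx : '.' ∉ xs) : ∀ (ys out : List Char) (count : Int),
    pvAltGo (xs ++ ys) out count true
    = pvAltGo ys (out ++ (pvFix xs).1) (count + (pvFix xs).2) (xs.all PySem.Chars.isspace) := by
  induction xs with
  | nil => simp [pvFix]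
  | cons c cs ih =>
    intro ys out count
    simp only [List.mem_cons, not_or] at hx
    simp only [List.cons_append, pvAltGo, if_neg (Ne.symm hx.1), pvFix, List.all_cons]
    by_cases hs : PySem.Chars.isspace c
    · simp only [hs, Bool.not_true, Bool.and_false, Bool.false_eq_true, if_false,
        if_pos hs, Bool.true_and]
      rw [ih hx.2 ys (out ++ [c]) count, List.append_assoc]
      rfl
    · by_cases hu : PySem.Chars.isupper c
      · simp only [hs, hu, Bool.not_false, Bool.and_true, Bool.not_true, if_neg hs,
          Bool.false_and, if_true, Bool.false_eq_true, if_false]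
        rw [altGo_copy cs ys (out ++ [PySem.Chars.upperChar c]) count hx.2,
          upperChar_of_isupper c hu, List.append_assoc]
        simp
      · simp only [hs, hu, Bool.not_false, Bool.and_true, if_neg hs, if_neg hu,
          Bool.false_and, if_true, Bool.false_eq_true, if_false]
        rw [altGo_copy cs ys (out ++ [PySem.Chars.upperChar c]) (count + 1) hx.2,
          List.append_assoc]
        rfl

theorem altGo_join (segs : List (List Char)) (hne : segs ≠ [])
    (hd : ∀ s ∈ segs, '.' ∉ s) : ∀ (out : List Char) (count : Int),
    pvAltGo (PySem.Chars.join ['.'] segs) out count true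
    = (count + (segs.map (fun s => (pvFix s).2)).sum,
       out ++ PySem.Chars.join ['.'] (segs.map (fun s => (pvFix s).1))) := by
  induction segs with
  | nil => exact absurd rfl hne
  | cons s ss ih =>
    intro out count
    cases ss with
    | nil =>
      simp only [List.map_cons, List.map_nil, PySem.Chars.join_singleton, List.sum_cons,
        List.sum_nil, add_zero]
      rw [← List.append_nil s, altGo_seg s (hd s (by simp)) [] out count]
      simp [pvAltGo]
    | cons s2 rest =>
      simp only [List.map_cons, PySem.Chars.join_cons_cons, ← List.map_cons]
      rw [List.append_assoc, altGo_seg s (hd s (by simp)) _ out count]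
      show pvAltGo ('.' :: PySem.Chars.join ['.'] (s2 :: rest)) _ _ _ = _
      simp only [pvAltGo, if_pos rfl]
      rw [ih (by simp) (fun t ht => hd t (by simp [ht])) (out ++ (pvFix s).1 ++ ['.'])
        (count + (pvFix s).2)]
      simp only [if_true, List.map_cons, List.sum_cons, PySem.Chars.join_cons_cons, Prod.mk.injEq]
      constructor
      · ring
      · simp

theorem innerA_eq (cur : List Char) : ∀ pre : List Char,
    pvInnerA (pre ++ cur)
      (PySem.List.pyRange (pre.length : Int) ((pre.length : Int) + (cur.length : Int)) 1)
    = (pre ++ (pvFix cur).1, (pvFix cur).2) := by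
  induction cur with
  | nil =>
    intro pre
    rw [PySem.List.pyRange_one_eq_nil (by simp)]
    simp [pvInnerA, pvFix]
  | cons c cs ih =>
    intro pre
    rw [PySem.List.pyRange_one_cons (by simp)]
    simp only [pvInnerA]
    have hget : PySem.List.pyGet? (pre ++ c :: cs) ((pre.length : Nat) : Int) = some c := by
      rw [PySem.List.pyGet?_natCast]
      simp [List.getElem?_append_right (le_refl pre.length)]
    rw [hget]
    by_cases hs : PySem.Chars.isspace c
    · simp only [hs, Bool.not_true, Bool.false_eq_true, if_false]
      have harg : ((pre.length : Int) + 1) = (((pre ++ [c]).length : Nat) : Int) := by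
        simp
      have harg2 : ((pre.length : Int) + ((c :: cs).length : Int))
          = (((pre ++ [c]).length : Nat) : Int) + ((cs.length : Nat) : Int) := by
        simp; omega
      rw [harg, harg2, show pre ++ c :: cs = (pre ++ [c]) ++ cs by simp, ih (pre ++ [c])]
      simp [pvFix, hs]
    · by_cases hu : PySem.Chars.isupper c
      · simp [pvFix, hs, hu]
      · simp only [hs, hu, Bool.not_false, if_true, Bool.false_eq_true, if_false]
        rw [PySem.List.slice_to_natCast]
        have : ((pre.length : Int) + 1) = (((pre.length + 1 : Nat)) : Int) := by push_cast; ring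
        rw [this, PySem.List.slice_from_natCast]
        simp [pvFix, hs, hu]

theorem innerA_full (s : List Char) :
    pvInnerA s (PySem.List.pyRange 0 (s.length : Int) 1) = pvFix s := by
  have := innerA_eq s []
  simpa using this

theorem outerA_eq (cur : List (List Char)) : ∀ (pre : List (List Char)) (n : Int),
    pvOuterA (pre ++ cur, n)
      (PySem.List.pyRange (pre.length : Int) ((pre.length : Int) + (cur.length : Int)) 1)
    = (pre ++ cur.map (fun s => (pvFix s).1), n + (cur.map (fun s => (pvFix s).2)).sum) := by
  induction cur with
  | nil =>
    intro pre n
    rw [PySem.List.pyRange_one_eq_nil (by simp)]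
    simp [pvOuterA]
  | cons s rest ih =>
    intro pre n
    rw [PySem.List.pyRange_one_cons (by simp)]
    simp only [pvOuterA]
    have hget : PySem.List.pyGet? (pre ++ s :: rest) ((pre.length : Nat) : Int) = some s := by
      rw [PySem.List.pyGet?_natCast]
      simp
    rw [hget]; dsimp only
    have hcast : ((pre.length : Int) + 1) = (((pre ++ [s]).length : Nat) : Int) := by simp
    have hcast2 : ((pre.length : Int) + ((s :: rest).length : Int))
        = (((pre ++ [s]).length : Nat) : Int) + ((rest.length : Nat) : Int) := by simp; omega
    by_cases hlen : s.length > 0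
    · rw [if_pos hlen]
      simp only [innerA_full]
      have hset : (pre ++ s :: rest).set ((pre.length : Int)).toNat (pvFix s).1
          = (pre ++ [(pvFix s).1]) ++ rest := by
        rw [Int.toNat_natCast, List.set_append_right _ _ (le_refl pre.length)]
        simp
      have hc1 : ((pre.length : Int) + 1) = (((pre ++ [(pvFix s).1]).length : Nat) : Int) := by simp
      have hc2 : ((pre.length : Int) + ((s :: rest).length : Int))
          = (((pre ++ [(pvFix s).1]).length : Nat) : Int) + ((rest.length : Nat) : Int) := by
        simp; omega
      rw [hset, hc1, hc2, ih (pre ++ [(pvFix s).1]) (n + (pvFix s).2)]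
      simp [add_assoc]
    · rw [if_neg hlen]
      have hs : s = [] := List.eq_nil_of_length_eq_zero (by omega)
      subst hs
      rw [show pre ++ [] :: rest = (pre ++ [[]]) ++ rest by simp, hcast, hcast2,
        ih (pre ++ [[]]) n]
      simp [pvFix]

theorem fix_eq_alt (usrStr : String) :
    (let sentences := PySem.Chars.splitOn usrStr.toList ['.']
     let res := pvOuterA (sentences, 0) (PySem.List.pyRange 0 (sentences.length : Int) 1)
     ((res.2 : Int), String.ofList (PySem.Chars.join ['.'] res.1)))
    = (let res := pvAltGo usrStr.toList [] 0 true
       (res.1, String.ofList res.2)) := by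
  simp only [splitOn_eq]
  have hA := outerA_eq (pvSplit usrStr.toList) [] 0
  simp only [List.nil_append, List.length_nil, Nat.cast_zero, zero_add] at hA
  have hB := altGo_join (pvSplit usrStr.toList) (pvSplit_ne_nil _) (not_dot_mem_pvSplit _) [] 0
  rw [join_pvSplit] at hB
  simp only [List.nil_append, zero_add] at hB
  simp [hA, hB]

-- ===== VERDICT (by name: the statement is the Claim_ definition above) =====
theorem fix_capitilization_spec : Claim_equal_fix_capitilization := by
  intro usrStr _
  unfold Spec_fix_capitilization fix_capitilization fix_capitilization_alt
  exact fix_eq_alt usrStr
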